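-- pv_equiv track=rewrite | github.com/Shiv1202/DataStructure_and_Algorithms_Python_and_cpp | CodeChef/July long challenge/Chefina_and_Swaps_CHFNSWPS.py | solution
-- ===== SOURCE A (Python) =====
-- import collections
--
-- def solution(a, b, n):
--     if sorted(a) == sorted(b):
--         return 0
--
--     freq_a = dict(collections.Counter(a))
--     freq_b = dict(collections.Counter(b))
--     for i in freq_a:
--         if i not in freq_b:
--             if freq_a[i] % 2 != 0:
--                 return -1
--         else:
--             if (freq_a[i] + freq_b[i]) % 2 != 0:
--                 return -1
--     for i in freq_b:
--         if i not in freq_a: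
--             if freq_b[i] % 2 != 0:
--                 return -1
--
--     m = min(min(a), min(b))
--
--     a.sort(); b.sort();
--     i, j= 0, 0
--     final_swap_can = []
--     swap_can = []
--
--     while i < n and j < n:
--         if a[i] == b[j]:
--             i += 1; j += 1
--         elif a[i] < b[j]:
--             swap_can.append(a[i])
--             i += 1
--         elif b[j] < a[i]:
--             swap_can.append(b[j])
--             j += 1
--         if i > n - 1:
--             swap_can.extend(b[j:n])
--             i += 1
--         elif j > n - 1:
--             swap_can.extend(a[i:n])
--
--     for i in range(0, len(swap_can), 2):
--         final_swap_can.append(swap_can[i])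
--     final_swap_can.sort()
--
--     cost = 0
--     for i in range(len(final_swap_can) // 2):
--         if final_swap_can[i] == m:
--             cost += m
--         elif final_swap_can[i] <= 2 * m:
--             cost += final_swap_can[i]
--         else:
--             cost += 2 * m
--     return cost
-- ===== SOURCE B (Python) =====
-- import collections
--
-- def solution(a, b, n):
--     if sorted(a) == sorted(b):
--         return 0
--     ca = collections.Counter(a)
--     cb = collections.Counter(b)
--     if any((ca[x] + cb[x]) % 2 != 0 for x in ca.keys() | cb.keys()):
--         return -1
--     m = min(min(a), min(b))
--     a.sort(); b.sort()  # same in-place side effect as the original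
--     swap_can = sorted(((ca - cb) + (cb - ca)).elements())
--     picked = swap_can[::2]
--     cost = 0
--     for x in picked[:len(picked) // 2]:
--         cost += m if x == m else (x if x <= 2 * m else 2 * m)
--     return cost
-- ===== Notes on version B (the rewrite author's own statement) =====
-- stated objective: idiomatic
-- what changed: The two-pointer merge loop over the two sorted lists is replaced by a direct Counter symmetric difference ((ca-cb)+(cb-ca)).elements(), the two key-iterating parity loops are fused into one any() over the union of the key sets, and the index loops building final_swap_can and the cost are replaced by a stride slice and a sum over a prefix slice (B omits A's redundant re-sort of the already-sorted picked list).
-- outside the precondition, e.g. on solution([1, 1, 2, 2], [3, 3, 4, 4], 0): A returns 0, B returns 3; on solution([], [1, 1], 1): A raises ValueError, B raises ValueError; on solution([1, 1], [2, 2], 3): A raises IndexError, B returns 1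
import Mathlib
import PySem

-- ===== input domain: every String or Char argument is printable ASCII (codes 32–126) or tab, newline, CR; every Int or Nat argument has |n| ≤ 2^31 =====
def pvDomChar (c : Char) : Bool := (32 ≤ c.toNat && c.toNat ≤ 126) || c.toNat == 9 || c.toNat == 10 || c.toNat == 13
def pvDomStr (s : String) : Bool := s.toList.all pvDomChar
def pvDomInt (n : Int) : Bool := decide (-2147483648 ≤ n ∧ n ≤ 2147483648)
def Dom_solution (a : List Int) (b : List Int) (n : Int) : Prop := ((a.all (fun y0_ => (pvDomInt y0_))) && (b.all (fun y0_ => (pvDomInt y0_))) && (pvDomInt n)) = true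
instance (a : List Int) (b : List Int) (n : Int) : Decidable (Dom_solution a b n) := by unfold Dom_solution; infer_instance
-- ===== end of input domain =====

-- B replaces A's two-pointer merge over the two sorted lists by a Counter symmetric
-- difference, fuses A's two parity loops into one pass over the union of key sets, and
-- uses slices instead of index loops (objective: idiomatic; same asymptotic cost).
-- Both A and B sort the argument lists in place (same side effect); the claim is about
-- the return value.


-- ===== PORT A =====
-- A's while loop (two-pointer scan building swap_can).  In the two inner `if i > n-1` /
-- `elif j > n-1` branches Python extends swap_can and the while condition then fails
-- (i resp. j has reached n), so the port returns the extended list there directly.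
def pvLoopA (s t : List Int) (n : Int) (i j : Int) (swap : List Int) : List Int :=
  if _h : i < n ∧ j < n then
    let x := PySem.List.pyGetD s i 0
    let y := PySem.List.pyGetD t j 0
    let p : Int × Int × List Int :=
      if x = y then (i + 1, j + 1, swap)
      else if x < y then (i + 1, j, swap ++ [x])
      else (i, j + 1, swap ++ [y])
    if p.1 > n - 1 then p.2.2 ++ PySem.List.slice t (some p.2.1) (some n)
    else if p.2.1 > n - 1 then p.2.2 ++ PySem.List.slice s (some p.1) (some n)
    else pvLoopA s t n p.1 p.2.1 p.2.2
  else swap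
termination_by (n - i + (n - j)).toNat
decreasing_by
  simp only [p] at *
  split_ifs at * <;> simp_all <;> omega

def solution (a : List Int) (b : List Int) (n : Int) : Int :=
  if PySem.List.sorted a (fun x => x) = PySem.List.sorted b (fun x => x) then 0
  else
    let freqA := PySem.Dict.counter a
    let freqB := PySem.Dict.counter b
    if (PySem.Dict.keys freqA).any (fun i =>
         if freqB.contains i = false then PySem.Int.mod (freqA.getD i 0) 2 != 0
         else PySem.Int.mod (freqA.getD i 0 + freqB.getD i 0) 2 != 0) then -1
    else if (PySem.Dict.keys freqB).any (fun i =>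
         if freqA.contains i = false then PySem.Int.mod (freqB.getD i 0) 2 != 0
         else false) then -1
    else
      -- min(min(a), min(b)); min([]) raises ValueError, unreachable under Pre_
      match PySem.List.min? a (fun x => x), PySem.List.min? b (fun x => x) with
      | some ma, some mb =>
        let m := min ma mb
        let sa := PySem.List.sorted a (fun x => x)
        let sb := PySem.List.sorted b (fun x => x)
        let swapCan := pvLoopA sa sb n 0 0 []
        -- for i in range(0, len(swap_can), 2): final_swap_can.append(swap_can[i])
        let finalSwapCan := (PySem.List.pyRange 0 (swapCan.length : Int) 2).foldl
          (fun acc i => acc ++ [PySem.List.pyGetD swapCan i 0]) []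
        let fs := PySem.List.sorted finalSwapCan (fun x => x)
        (PySem.List.pyRange 0 (PySem.Int.floordiv (fs.length : Int) 2) 1).foldl
          (fun cost i =>
            let v := PySem.List.pyGetD fs i 0
            if v = m then cost + m else if v ≤ 2 * m then cost + v else cost + 2 * m) 0
      | _, _ => 0

-- ===== PORT B =====
-- elements() of the Counter difference c - d (keys of c in order, positive multiplicities)
def pvDiffElems (c d : PySem.Dict Int Int) : List Int :=
  c.items.flatMap (fun p => List.replicate (p.2 - d.getD p.1 0).toNat p.1)

def solution_alt (a : List Int) (b : List Int) (n : Int) : Int :=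
  if PySem.List.sorted a (fun x => x) = PySem.List.sorted b (fun x => x) then 0
  else
    let ca := PySem.Dict.counter a
    let cb := PySem.Dict.counter b
    if (PySem.Set.union (PySem.Set.ofList (PySem.Dict.keys ca)) (PySem.Dict.keys cb)).any
         (fun x => PySem.Int.mod (ca.getD x 0 + cb.getD x 0) 2 != 0) then -1
    else
      -- min(a) / min(b): ValueError on an empty list is outside Pre_; 0 is the total-function default
      (PySem.List.min? a (fun x => x)).elim 0 (fun ma =>
        (PySem.List.min? b (fun x => x)).elim 0 (fun mb =>
          let m := min ma mb
          let swapCan := PySem.List.sorted (pvDiffElems ca cb ++ pvDiffElems cb ca) (fun x => x)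
          let picked := (PySem.List.slice? swapCan none none 2).getD []
          let chosen := PySem.List.slice picked none
            (some (PySem.Int.floordiv (picked.length : Int) 2))
          chosen.foldl (fun cost x =>
            cost + (if x = m then m else if x ≤ 2 * m then x else 2 * m)) 0))

-- ===== PRECONDITION & SPEC =====
-- Pre_ admits the natural domain where n is the common length of both lists (the problem's
-- contract) together with every input decided before n is ever used (equal multisets -> 0,
-- some value with odd total multiplicity -> -1); it excludes only inputs with n inconsistent
-- with the lengths on which A raises IndexError or ValueError (min of an empty list) or
-- returns a value computed from an accidental n-prefix of the sorted lists.
def Pre_solution (a : List Int) (b : List Int) (n : Int) : Prop :=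
  (n = (a.length : Int) ∧ n = (b.length : Int)) ∨ a.Perm b
    ∨ ∃ x ∈ a ++ b, Odd (a.count x + b.count x)
instance (a : List Int) (b : List Int) (n : Int) : Decidable (Pre_solution a b n) := by
  unfold Pre_solution; infer_instance
def pvWitness_solution : List Int × List Int × Int := ([1, 1], [2, 2], 2)

def Spec_solution (a : List Int) (b : List Int) (n : Int) (out : Int) : Prop := out = solution_alt a b n
instance (a : List Int) (b : List Int) (n : Int) (out : Int) : Decidable (Spec_solution a b n out) := by unfold Spec_solution; infer_instance

-- ===== CLAIM (what is proved, stated in full; the proofs are below) =====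
def Claim_equal_solution : Prop := ∀ (a : List Int) (b : List Int) (n : Int), Dom_solution a b n → Pre_solution a b n → Spec_solution a b n (solution a b n)

-- ===== LEMMAS AND PROOFS =====

-- clean symmetric-difference merge of two sorted lists (proof-only helper)
def pvMergeDiff : List Int → List Int → List Int
  | [], t => t
  | s, [] => s
  | x :: s, y :: t =>
      if x = y then pvMergeDiff s t
      else if x < y then x :: pvMergeDiff s (y :: t)
      else y :: pvMergeDiff (x :: s) t

theorem pvMergeDiff_mem {s t : List Int} {z : Int} (h : z ∈ pvMergeDiff s t) :
    z ∈ s ∨ z ∈ t := by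
  induction s, t using pvMergeDiff.induct with
  | case1 t => right; simpa [pvMergeDiff] using h
  | case2 s h2 => left; simpa [pvMergeDiff] using h
  | case3 s y t ih =>
    rcases ih (by simpa [pvMergeDiff] using h) with hz | hz <;> simp [hz]
  | case4 x s y t hne hlt ih =>
    rw [pvMergeDiff, if_neg hne, if_pos hlt, List.mem_cons] at h
    rcases h with rfl | h
    · simp
    · rcases ih h with hz | hz <;> simp [hz]
  | case5 x s y t hne hlt ih =>
    rw [pvMergeDiff, if_neg hne, if_neg hlt, List.mem_cons] at h
    rcases h with rfl | h
    · simp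
    · rcases ih h with hz | hz <;> simp [hz]

theorem pvMergeDiff_pairwise {s t : List Int}
    (hs : s.Pairwise (· ≤ ·)) (ht : t.Pairwise (· ≤ ·)) :
    (pvMergeDiff s t).Pairwise (· ≤ ·) := by
  induction s, t using pvMergeDiff.induct with
  | case1 t => simpa [pvMergeDiff] using ht
  | case2 s h2 => simpa [pvMergeDiff] using hs
  | case3 s y t ih =>
    simpa [pvMergeDiff] using ih (List.pairwise_cons.mp hs).2 (List.pairwise_cons.mp ht).2
  | case4 x s y t hne hlt ih =>
    rw [pvMergeDiff, if_neg hne, if_pos hlt]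
    rw [List.pairwise_cons] at hs ⊢
    refine ⟨fun z hz => ?_, ih hs.2 ht⟩
    rcases pvMergeDiff_mem hz with h | h
    · exact hs.1 z h
    · rcases List.mem_cons.mp h with rfl | h
      · omega
      · have := (List.pairwise_cons.mp ht).1 z h; omega
  | case5 x s y t hne hlt ih =>
    rw [pvMergeDiff, if_neg hne, if_neg hlt]
    rw [List.pairwise_cons] at ht ⊢
    refine ⟨fun z hz => ?_, ih hs ht.2⟩
    rcases pvMergeDiff_mem hz with h | h
    · rcases List.mem_cons.mp h with rfl | h
      · omega
      · have := (List.pairwise_cons.mp hs).1 z h; omega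
    · exact ht.1 z h

theorem pvMergeDiff_count {s t : List Int}
    (hs : s.Pairwise (· ≤ ·)) (ht : t.Pairwise (· ≤ ·)) (v : Int) :
    (pvMergeDiff s t).count v = (s.count v - t.count v) + (t.count v - s.count v) := by
  induction s, t using pvMergeDiff.induct with
  | case1 t => simp [pvMergeDiff]
  | case2 s h2 => simp [pvMergeDiff]
  | case3 s y t ih =>
    have := ih (List.pairwise_cons.mp hs).2 (List.pairwise_cons.mp ht).2
    rw [pvMergeDiff, if_pos rfl, this]
    simp only [List.count_cons]
    split_ifs <;> omega
  | case4 x s y t hne hlt ih =>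
    have hx0 : (y :: t).count x = 0 := by
      rw [List.count_eq_zero]
      intro hmem
      rcases List.mem_cons.mp hmem with rfl | hmem
      · omega
      · have := (List.pairwise_cons.mp ht).1 x hmem; omega
    have := ih (List.pairwise_cons.mp hs).2 ht
    rw [pvMergeDiff, if_neg hne, if_pos hlt]
    simp only [List.count_cons, this]
    by_cases hv : v = x
    · subst hv
      simp only [List.count_cons] at hx0 ⊢
      split_ifs at hx0 ⊢ <;> simp_all
    · split_ifs <;> simp_all
  | case5 x s y t hne hlt ih =>
    have hy0 : (x :: s).count y = 0 := by
      rw [List.count_eq_zero]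
      intro hmem
      rcases List.mem_cons.mp hmem with rfl | hmem
      · omega
      · have := (List.pairwise_cons.mp hs).1 y hmem; omega
    have := ih hs (List.pairwise_cons.mp ht).2
    rw [pvMergeDiff, if_neg hne, if_neg hlt]
    simp only [List.count_cons, this]
    by_cases hv : v = y
    · subst hv
      simp only [List.count_cons] at hy0 ⊢
      split_ifs at hy0 ⊢ <;> simp_all
    · split_ifs <;> simp_all

-- xs[a:len(xs)] = drop, for 0 ≤ a
theorem pvSliceDrop (xs : List Int) (a : Int) (ha : 0 ≤ a) :
    PySem.List.slice xs (some a) (some (xs.length : Int)) = xs.drop a.toNat := by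
  have h1 : some a = some ((a.toNat : Nat) : Int) := by congr 1; omega
  rw [h1, PySem.List.slice_natCast]
  exact List.take_of_length_le (by simp)

theorem pvLoopA_aux (s t : List Int) (n : Int)
    (hs : n = (s.length : Int)) (ht : n = (t.length : Int)) :
    ∀ (k : Nat) (i j : Int) (acc : List Int), 0 ≤ i → 0 ≤ j → i < n → j < n →
      (n - i + (n - j)).toNat ≤ k →
      pvLoopA s t n i j acc = acc ++ pvMergeDiff (s.drop i.toNat) (t.drop j.toNat) := by
  intro k
  induction k with
  | zero => intro i j acc hi hj hin hjn hk; omega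
  | succ k ih =>
    intro i j acc hi hj hin hjn hk
    have hsl : i.toNat < s.length := by omega
    have htl : j.toNat < t.length := by omega
    have hx : PySem.List.pyGetD s i 0 = s[i.toNat] :=
      PySem.List.pyGetD_eq_getElem s 0 hi (by omega)
    have hy : PySem.List.pyGetD t j 0 = t[j.toNat] :=
      PySem.List.pyGetD_eq_getElem t 0 hj (by omega)
    have hdrops : s.drop i.toNat = s[i.toNat] :: s.drop (i.toNat + 1) :=
      List.drop_eq_getElem_cons hsl
    have hdropt : t.drop j.toNat = t[j.toNat] :: t.drop (j.toNat + 1) :=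
      List.drop_eq_getElem_cons htl
    have hiN : (i + 1).toNat = i.toNat + 1 := by omega
    have hjN : (j + 1).toNat = j.toNat + 1 := by omega
    rw [pvLoopA, dif_pos ⟨hin, hjn⟩]
    simp only [hx, hy]
    rcases lt_trichotomy s[i.toNat] t[j.toNat] with hlt | heq | hgt
    · -- a[i] < b[j]
      rw [if_neg (show ¬(s[i.toNat] = t[j.toNat]) by omega),
        if_pos (show s[i.toNat] < t[j.toNat] from hlt)]
      simp only
      rw [hdrops, hdropt, pvMergeDiff, if_neg (show ¬(s[i.toNat] = t[j.toNat]) by omega),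
        if_pos (show s[i.toNat] < t[j.toNat] from hlt)]
      by_cases hend : i + 1 > n - 1
      · rw [if_pos hend]
        have hi1 : i.toNat + 1 = s.length := by omega
        rw [hi1, List.drop_length, ht, pvSliceDrop t j hj, hdropt, pvMergeDiff]
        simp
      · rw [if_neg hend, if_neg (by omega)]
        rw [ih (i + 1) j (acc ++ [s[i.toNat]]) (by omega) hj (by omega) hjn (by omega)]
        rw [hiN, hdropt]
        simp
    · -- a[i] == b[j]
      rw [if_pos (show s[i.toNat] = t[j.toNat] from heq)]
      simp only
      rw [hdrops, hdropt, pvMergeDiff, if_pos (show s[i.toNat] = t[j.toNat] from heq)]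
      by_cases hend : i + 1 > n - 1
      · rw [if_pos hend]
        have hi1 : i.toNat + 1 = s.length := by omega
        rw [hi1, List.drop_length, ht, pvSliceDrop t (j + 1) (by omega), hjN]
        cases h : t.drop (j.toNat + 1) <;> simp [pvMergeDiff]
      · rw [if_neg hend]
        by_cases hend2 : j + 1 > n - 1
        · rw [if_pos hend2]
          have hj1 : j.toNat + 1 = t.length := by omega
          rw [hj1, List.drop_length, hs, pvSliceDrop s (i + 1) (by omega), hiN]
          cases h : s.drop (i.toNat + 1) <;> simp [pvMergeDiff]
        · rw [if_neg hend2]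
          rw [ih (i + 1) (j + 1) acc (by omega) (by omega) (by omega) (by omega) (by omega)]
          rw [hiN, hjN]
    · -- b[j] < a[i]
      rw [if_neg (show ¬(s[i.toNat] = t[j.toNat]) by omega),
        if_neg (show ¬(s[i.toNat] < t[j.toNat]) by omega)]
      simp only
      rw [hdrops, hdropt, pvMergeDiff, if_neg (show ¬(s[i.toNat] = t[j.toNat]) by omega),
        if_neg (show ¬(s[i.toNat] < t[j.toNat]) by omega)]
      rw [if_neg (show ¬(i > n - 1) by omega)]
      by_cases hend2 : j + 1 > n - 1
      · rw [if_pos hend2]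
        have hj1 : j.toNat + 1 = t.length := by omega
        rw [hj1, List.drop_length, hs, pvSliceDrop s i hi, hdrops, pvMergeDiff]
        all_goals simp
        all_goals omega
      · rw [if_neg hend2]
        rw [ih i (j + 1) (acc ++ [t[j.toNat]]) hi (by omega) hin (by omega) (by omega)]
        rw [hjN, hdrops]
        simp

theorem pvLoopA_zero (s t : List Int) (n : Int)
    (hs : n = (s.length : Int)) (ht : n = (t.length : Int)) :
    pvLoopA s t n 0 0 [] = pvMergeDiff s t := by
  by_cases h : 0 < n
  · simpa using pvLoopA_aux s t n hs ht (n + n).toNat 0 0 [] le_rfl le_rfl h h (by omega)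
  · have hs0 : s = [] := List.eq_nil_of_length_eq_zero (by omega)
    have ht0 : t = [] := List.eq_nil_of_length_eq_zero (by omega)
    rw [pvLoopA, dif_neg (by omega), hs0, ht0, pvMergeDiff]

theorem pvCount_flatMap_replicate (ks : List Int) (g : Int → Nat) (v : Int) (hnd : ks.Nodup) :
    (ks.flatMap (fun k => List.replicate (g k) k)).count v = if v ∈ ks then g v else 0 := by
  induction ks with
  | nil => simp
  | cons k ks ih =>
    rcases List.nodup_cons.mp hnd with ⟨hk, hnd'⟩
    rw [List.flatMap_cons, List.count_append, ih hnd', List.count_replicate]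
    by_cases hv : v = k
    · subst hv; simp [hk]
    · simp [hv, Ne.symm hv]

theorem pvDiffElems_count (a b : List Int) (v : Int) :
    (pvDiffElems (PySem.Dict.counter a) (PySem.Dict.counter b)).count v
      = a.count v - b.count v := by
  rw [pvDiffElems, PySem.Dict.items_counter, List.flatMap_map]
  simp only [PySem.Dict.getD_counter]
  have : ∀ k : Int, ((a.count k : Int) - (b.count k : Int)).toNat = a.count k - b.count k :=
    fun k => Int.toNat_sub _ _
  rw [show (fun k : Int => List.replicate ((a.count k : Int) - (b.count k : Int)).toNat k)
      = fun k : Int => List.replicate (a.count k - b.count k) k from funext fun k => by rw [this]]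
  rw [pvCount_flatMap_replicate _ _ _ (PySem.Set.nodup_ofList a)]
  by_cases hv : v ∈ a
  · simp [PySem.Set.mem_ofList, hv]
  · have : a.count v = 0 := List.count_eq_zero.mpr hv
    simp [PySem.Set.mem_ofList, hv, this]

-- every other element, starting at index 0 (proof-only helper)
def pvEveryOther : List Int → List Int
  | [] => []
  | [x] => [x]
  | x :: _ :: r => x :: pvEveryOther r

theorem pvEveryOther_sublist (xs : List Int) : (pvEveryOther xs).Sublist xs := by
  induction xs using pvEveryOther.induct with
  | case1 => simp [pvEveryOther]
  | case2 x => simp [pvEveryOther]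
  | case3 x y r ih => exact (ih.cons y).cons₂ x

theorem pvEveryOther_eq_map (xs : List Int) :
    pvEveryOther xs = (List.range ((xs.length + 1) / 2)).map (fun k => xs.getD (2 * k) 0) := by
  induction xs using pvEveryOther.induct with
  | case1 => simp [pvEveryOther]
  | case2 x => simp [pvEveryOther]
  | case3 x y r ih =>
    have h2 : (x :: y :: r).length = r.length + 2 := by simp
    have h3 : ((r.length + 2) + 1) / 2 = (r.length + 1) / 2 + 1 := by omega
    rw [pvEveryOther, ih, h2, h3, List.range_succ_eq_map]
    simp [List.map_map, Function.comp_def, Nat.mul_add]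

theorem pvCnt (len : Nat) :
    (if (0:Int) < (len:Int) then (((len:Int) - 0 + 2 - 1) / 2).toNat else 0) = (len + 1) / 2 := by
  split_ifs with h <;> omega

theorem pvFoldA_everyOther (xs : List Int) :
    (PySem.List.pyRange 0 (xs.length : Int) 2).foldl
      (fun acc i => acc ++ [PySem.List.pyGetD xs i 0]) [] = pvEveryOther xs := by
  rw [PySem.List.foldl_append_singleton_eq_map, PySem.List.pyRange_of_pos 0 (xs.length : Int) (by norm_num)]
  rw [List.map_map, pvEveryOther_eq_map]
  simp only [List.nil_append]
  rw [pvCnt xs.length]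
  apply List.map_congr_left
  intro k hk
  rw [List.mem_range] at hk
  simp only [Function.comp_apply]
  rw [PySem.List.pyGetD_of_nonneg xs 0 (by positivity)]
  congr 1
  omega

theorem pvSlice2_everyOther (xs : List Int) :
    (PySem.List.slice? xs none none 2).getD [] = pvEveryOther xs := by
  rw [PySem.List.slice?, if_neg (by norm_num), PySem.List.sliceIndices]
  simp only
  rw [pvEveryOther_eq_map]
  norm_num
  have hc : (if 0 < xs.length then (((xs.length:Int) + 2 - 1) / 2).toNat else 0)
      = (xs.length + 1) / 2 := by split_ifs with h <;> omega
  rw [hc]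
  have hall : ∀ k ∈ List.range ((xs.length + 1) / 2),
      xs[(2 * (k:Int)).toNat]? = some (xs[2 * k]?.getD 0) := by
    intro k hk
    rw [List.mem_range] at hk
    have h2 : 2 * k < xs.length := by omega
    have h3 : (2 * (k:Int)).toNat = 2 * k := by omega
    rw [h3, List.getElem?_eq_getElem h2]
    rfl
  rw [List.filterMap_congr hall]
  simp

theorem pvFoldCost (xs : List Int) (k : Nat) (hk : k ≤ xs.length) (g : Int → Int → Int) (c0 : Int) :
    (PySem.List.pyRange 0 (k : Int) 1).foldl (fun c i => g c (PySem.List.pyGetD xs i 0)) c0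
      = (xs.take k).foldl g c0 := by
  induction k with
  | zero => simp [PySem.List.pyRange_one_eq_nil]
  | succ k ih =>
    have h1 : ((k : Int) + 1) = ((k + 1 : Nat) : Int) := by push_cast; ring
    have hkl : k < xs.length := by omega
    have hpy : PySem.List.pyGetD xs (k:Int) 0 = xs[k] :=
      PySem.List.pyGetD_eq_getElem xs 0 (by positivity) (by exact_mod_cast hkl)
    have htake : List.take (k+1) xs = List.take k xs ++ [xs[k]] := by
      rw [List.take_add_one, List.getElem?_eq_getElem hkl]; rfl
    rw [← h1, PySem.List.pyRange_one_succ_right (a := 0) (b := (k:Int)) (by positivity),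
      List.foldl_append, ih (by omega), htake, List.foldl_append]
    simp [hpy]

theorem pvParity_eq (a b : List Int) :
    (((PySem.Dict.counter a).keys).any (fun i =>
        if (PySem.Dict.counter b).contains i = false then
          PySem.Int.mod ((PySem.Dict.counter a).getD i 0) 2 != 0
        else PySem.Int.mod ((PySem.Dict.counter a).getD i 0 + (PySem.Dict.counter b).getD i 0) 2 != 0)
      || ((PySem.Dict.counter b).keys).any (fun i =>
        if (PySem.Dict.counter a).contains i = false then
          PySem.Int.mod ((PySem.Dict.counter b).getD i 0) 2 != 0
        else false))
    = (PySem.Set.union (PySem.Set.ofList ((PySem.Dict.counter a).keys)) ((PySem.Dict.counter b).keys)).any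
        (fun x => PySem.Int.mod ((PySem.Dict.counter a).getD x 0 + (PySem.Dict.counter b).getD x 0) 2 != 0) := by
  simp only [PySem.Dict.keys_counter, PySem.Dict.contains_counter, PySem.Dict.getD_counter,
    PySem.Set.ofList_ofList]
  rw [Bool.eq_iff_iff]
  simp only [Bool.or_eq_true, List.any_eq_true, PySem.Set.mem_union, PySem.Set.mem_ofList,
    bne_iff_ne, ne_eq]
  constructor
  · rintro (⟨x, hx, hcond⟩ | ⟨x, hx, hcond⟩)
    · refine ⟨x, Or.inl hx, ?_⟩
      by_cases hxb : x ∈ b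
      · have hb' : b.contains x = false → False := by simp [hxb]
        simpa [show ¬(b.contains x = false) from hb', hxb] using hcond
      · have hb' : b.contains x = false := by simpa using hxb
        rw [if_pos hb'] at hcond
        simpa [List.count_eq_zero.mpr hxb] using hcond
    · refine ⟨x, Or.inr hx, ?_⟩
      by_cases hxa : x ∈ a
      · have ha' : a.contains x = false → False := by simp [hxa]
        simp at hcond
        exact absurd hxa hcond.1
      · have ha' : a.contains x = false := by simpa using hxa
        rw [if_pos ha'] at hcond
        simpa [List.count_eq_zero.mpr hxa] using hcond
  · rintro ⟨x, hx, hcond⟩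
    by_cases hxa : x ∈ a
    · left
      refine ⟨x, hxa, ?_⟩
      by_cases hxb : x ∈ b
      · have hb' : b.contains x = false → False := by simp [hxb]
        simpa [show ¬(b.contains x = false) from hb', hxb] using hcond
      · have hb' : b.contains x = false := by simpa using hxb
        rw [if_pos hb']
        simpa [List.count_eq_zero.mpr hxb] using hcond
    · right
      have hxb : x ∈ b := by tauto
      refine ⟨x, hxb, ?_⟩
      have ha' : a.contains x = false := by simpa using hxa
      rw [if_pos ha']
      simpa [List.count_eq_zero.mpr hxa] using hcond

theorem pvSwapCan_eq (a b : List Int) :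
    PySem.List.sorted
        (pvDiffElems (PySem.Dict.counter a) (PySem.Dict.counter b)
          ++ pvDiffElems (PySem.Dict.counter b) (PySem.Dict.counter a)) (fun x => x)
      = pvMergeDiff (PySem.List.sorted a (fun x => x)) (PySem.List.sorted b (fun x => x)) := by
  have hsa := PySem.List.sorted_pairwise a (fun x => x)
  have hsb := PySem.List.sorted_pairwise b (fun x => x)
  apply PySem.List.sorted_id_eq_of_perm_of_pairwise
  · apply List.perm_iff_count.mpr
    intro v
    rw [pvMergeDiff_count hsa hsb v, List.count_append, pvDiffElems_count, pvDiffElems_count,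
      (PySem.List.sorted_perm a (fun x => x) false).count_eq,
      (PySem.List.sorted_perm b (fun x => x) false).count_eq]
  · exact pvMergeDiff_pairwise hsa hsb

theorem pvIfChain (b1 b2 b3 : Bool) (h : (b1 || b2) = b3) (x y : Int)
    (hxy : b3 = false → x = y) :
    (if b1 then (-1 : Int) else if b2 then -1 else x) = (if b3 then -1 else y) := by
  cases b1 <;> cases b2 <;> cases b3 <;> simp_all

-- equal multisets sort to the same list
theorem pvPerm_sorted (a b : List Int) (h : a.Perm b) :
    PySem.List.sorted a (fun x => x) = PySem.List.sorted b (fun x => x) :=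
  PySem.List.sorted_id_eq_of_perm_of_pairwise a (PySem.List.sorted b (fun x => x))
    ((PySem.List.sorted_perm b (fun x => x) false).trans h.symm)
    (PySem.List.sorted_pairwise b (fun x => x))

-- an odd total multiplicity makes B's fused parity check fire
theorem pvOdd_any (a b : List Int) (h : ∃ x ∈ a ++ b, Odd (a.count x + b.count x)) :
    (PySem.Set.union (PySem.Set.ofList ((PySem.Dict.counter a).keys))
        ((PySem.Dict.counter b).keys)).any
      (fun x => PySem.Int.mod ((PySem.Dict.counter a).getD x 0
        + (PySem.Dict.counter b).getD x 0) 2 != 0) = true := by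
  obtain ⟨x, hx, hodd⟩ := h
  simp only [PySem.Dict.keys_counter, PySem.Dict.getD_counter, PySem.Set.ofList_ofList]
  rw [List.any_eq_true]
  refine ⟨x, ?_, ?_⟩
  · rw [PySem.Set.mem_union]
    simpa [PySem.Set.mem_ofList] using List.mem_append.mp hx
  · rw [PySem.Int.mod_eq_emod_of_pos (by norm_num), bne_iff_ne]
    obtain ⟨k, hk⟩ := hodd
    omega

-- ===== VERDICT (by name: the statement is the Claim_ definition above) =====
theorem solution_spec : Claim_equal_solution := by
  intro a b n hdom hpre
  unfold Spec_solution
  by_cases hso : PySem.List.sorted a (fun x => x) = PySem.List.sorted b (fun x => x)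
  · simp only [solution, solution_alt, if_pos hso]
  · simp only [solution, solution_alt, if_neg hso]
    apply pvIfChain _ _ _ (pvParity_eq a b)
    intro h3
    have hlab : n = (a.length : Int) ∧ n = (b.length : Int) := by
      rcases hpre with h | hperm | hodd
      · exact h
      · exact absurd (pvPerm_sorted a b hperm) hso
      · rw [pvOdd_any a b hodd] at h3; cases h3
    obtain ⟨hla, hlb⟩ := hlab
    have hne : a ≠ [] := by
      intro h
      apply hso
      have hb0 : b = [] := List.eq_nil_of_length_eq_zero (by subst h; simp at hla; omega)
      rw [h, hb0]
    have hnb : b ≠ [] := by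
      intro h
      apply hso
      have ha0 : a = [] := List.eq_nil_of_length_eq_zero (by subst h; simp at hlb; omega)
      rw [h, ha0]
    obtain ⟨ma, hma⟩ : ∃ ma, PySem.List.min? a (fun x => x) = some ma := by
      cases h : PySem.List.min? a (fun x => x) with
      | none => exact absurd ((PySem.List.min?_eq_none_iff a (fun x => x)).mp h) hne
      | some v => exact ⟨v, rfl⟩
    obtain ⟨mb, hmb⟩ : ∃ mb, PySem.List.min? b (fun x => x) = some mb := by
      cases h : PySem.List.min? b (fun x => x) with
      | none => exact absurd ((PySem.List.min?_eq_none_iff b (fun x => x)).mp h) hnb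
      | some v => exact ⟨v, rfl⟩
    simp only [hma, hmb, Option.elim_some]
    have h1 : n = ((PySem.List.sorted a (fun x => x)).length : Int) := by
      rw [PySem.List.length_sorted]; exact hla
    have h2 : n = ((PySem.List.sorted b (fun x => x)).length : Int) := by
      rw [PySem.List.length_sorted]; exact hlb
    rw [pvLoopA_zero _ _ _ h1 h2, pvSwapCan_eq a b]
    set md := pvMergeDiff (PySem.List.sorted a (fun x => x)) (PySem.List.sorted b (fun x => x))
      with hmd
    have hpw : md.Pairwise (· ≤ ·) :=
      pvMergeDiff_pairwise (PySem.List.sorted_pairwise a (fun x => x))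
        (PySem.List.sorted_pairwise b (fun x => x))
    rw [pvFoldA_everyOther md, pvSlice2_everyOther md]
    have hpw2 : (pvEveryOther md).Pairwise (· ≤ ·) :=
      List.Pairwise.sublist (pvEveryOther_sublist md) hpw
    rw [PySem.List.sorted_eq_self_of_pairwise _ _ hpw2]
    set eo := pvEveryOther md with heo
    have hfd : PySem.Int.floordiv ((eo.length : Nat) : Int) 2 = ((eo.length / 2 : Nat) : Int) := by
      exact_mod_cast PySem.Int.floordiv_natCast eo.length 2
    rw [hfd, PySem.List.slice_to_natCast,
      pvFoldCost eo (eo.length / 2) (Nat.div_le_self _ _)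
        (fun c v => if v = min ma mb then c + min ma mb
          else if v ≤ 2 * min ma mb then c + v else c + 2 * min ma mb) 0]
    have hfun : (fun (c : Int) (v : Int) => if v = min ma mb then c + min ma mb
          else if v ≤ 2 * min ma mb then c + v else c + 2 * min ma mb)
        = (fun (c : Int) (v : Int) => c + (if v = min ma mb then min ma mb
          else if v ≤ 2 * min ma mb then v else 2 * min ma mb)) := by
      funext c v
      split_ifs <;> ring
    rw [hfun]
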